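-- pv_equiv track=rewrite | github.com/wzzClementine/workflow3 | app/utils/cut_questions_by_ocr.py | find_next_header_y_between
-- ===== SOURCE A (Python) =====
-- def find_next_header_y_between(header_boxes, y_start, y_next):
--     candidates = []
--     for hb in header_boxes:
--         if y_start < hb["y"] < y_next:
--             candidates.append(hb["y"])
--     if not candidates:
--         return None
--     return min(candidates)
-- ===== SOURCE B (Python) =====
-- def find_next_header_y_between(header_boxes, y_start, y_next):
--     for y in sorted(hb["y"] for hb in header_boxes):
--         if y_start < y < y_next:
--             return y
--     return None
-- ===== Notes on version B (the rewrite author's own statement) =====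
-- stated objective: alternative
-- what changed: Replaces collect-candidates-then-min with sort-then-first-match: sort all y-values ascending and return the first one strictly inside the interval, which is the minimum candidate by sortedness.
import Mathlib
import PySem

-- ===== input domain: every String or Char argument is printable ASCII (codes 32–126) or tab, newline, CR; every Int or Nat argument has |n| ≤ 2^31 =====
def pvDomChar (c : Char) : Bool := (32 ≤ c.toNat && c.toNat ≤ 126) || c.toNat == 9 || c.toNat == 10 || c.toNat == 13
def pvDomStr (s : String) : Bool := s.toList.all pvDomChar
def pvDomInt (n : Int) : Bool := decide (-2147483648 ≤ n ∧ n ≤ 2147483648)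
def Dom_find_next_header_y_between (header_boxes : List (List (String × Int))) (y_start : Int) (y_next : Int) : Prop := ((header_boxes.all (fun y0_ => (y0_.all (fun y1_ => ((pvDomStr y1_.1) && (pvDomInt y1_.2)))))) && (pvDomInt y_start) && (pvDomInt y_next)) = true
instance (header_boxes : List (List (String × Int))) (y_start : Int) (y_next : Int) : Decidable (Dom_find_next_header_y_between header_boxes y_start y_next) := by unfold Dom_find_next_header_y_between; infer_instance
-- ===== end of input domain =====

-- B replaces A's collect-then-min with sort-then-first-match: sort all y-values, return the
-- first one strictly inside the interval (alternative algorithm; correct since the first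
-- in-interval value in ascending order is the minimum candidate).

-- ===== PORT A =====
-- hb["y"] on the association list: first match; Pre_ guarantees the key is present.
def pvKey (hb : List (String × Int)) : Int := (PySem.Dict.mk hb).getD "y" 0

def find_next_header_y_between (header_boxes : List (List (String × Int))) (y_start : Int) (y_next : Int) : Option Int :=
  let candidates : List Int :=
    header_boxes.foldl (fun acc hb =>
      if y_start < pvKey hb ∧ pvKey hb < y_next then acc ++ [pvKey hb] else acc) []
  if candidates = [] then none
  else PySem.List.min? candidates (fun x => x)

-- ===== PORT B =====
-- Source B: for y in sorted(hb["y"] for hb in header_boxes): if y_start < y < y_next: return y / return None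
def find_next_header_y_between_alt (header_boxes : List (List (String × Int))) (y_start : Int) (y_next : Int) : Option Int :=
  let ys := PySem.List.sorted (header_boxes.map pvKey) (fun y => y) false
  ys.find? (fun y => decide (y_start < y ∧ y < y_next))

-- ===== PRECONDITION & SPEC =====
-- Pre_ excludes inputs where some box lacks the key "y": Python A (and B) raise KeyError there.
def Pre_find_next_header_y_between (header_boxes : List (List (String × Int))) (y_start : Int) (y_next : Int) : Prop :=
  ∀ hb ∈ header_boxes, (PySem.Dict.mk hb).contains "y" = true
instance (header_boxes : List (List (String × Int))) (y_start : Int) (y_next : Int) : Decidable (Pre_find_next_header_y_between header_boxes y_start y_next) := by unfold Pre_find_next_header_y_between; infer_instance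
def pvWitness_find_next_header_y_between : (List (List (String × Int))) × Int × Int := ([[("y", 5)], [("y", 3)]], 1, 10)

def Spec_find_next_header_y_between (header_boxes : List (List (String × Int))) (y_start : Int) (y_next : Int) (out : Option Int) : Prop := out = find_next_header_y_between_alt header_boxes y_start y_next
instance (header_boxes : List (List (String × Int))) (y_start : Int) (y_next : Int) (out : Option Int) : Decidable (Spec_find_next_header_y_between header_boxes y_start y_next out) := by unfold Spec_find_next_header_y_between; infer_instance

-- ===== CLAIM =====
def Claim_equal_find_next_header_y_between : Prop := ∀ (header_boxes : List (List (String × Int))) (y_start : Int) (y_next : Int), Dom_find_next_header_y_between header_boxes y_start y_next → Pre_find_next_header_y_between header_boxes y_start y_next → Spec_find_next_header_y_between header_boxes y_start y_next (find_next_header_y_between header_boxes y_start y_next)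

-- ===== LEMMAS AND PROOFS =====

-- On a ≤-sorted list, find? returns the least element satisfying p.
theorem pv_find?_sorted (p : Int → Bool) (s : List Int) (hs : s.Pairwise (· ≤ ·))
    (a : Int) (ha : a ∈ s) (hpa : p a = true)
    (hmin : ∀ y ∈ s, p y = true → a ≤ y) : s.find? p = some a := by
  induction s with
  | nil => cases ha
  | cons x t ih =>
      rcases List.pairwise_cons.mp hs with ⟨hx, ht⟩
      by_cases hpx : p x = true
      · have hax : a ≤ x := hmin x (List.mem_cons_self) hpx
        have hxa : x ≤ a := by
          rcases List.mem_cons.mp ha with rfl | hat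
          · exact le_refl _
          · exact hx a hat
        simp [List.find?, hpx, le_antisymm hax hxa]
      · have hat : a ∈ t := by
          rcases List.mem_cons.mp ha with rfl | h
          · exact absurd hpa hpx
          · exact h
        have := ih ht hat (fun y hy hpy => hmin y (List.mem_cons_of_mem _ hy) hpy)
        simpa [List.find?, hpx] using this

theorem pv_main (header_boxes : List (List (String × Int))) (y_start y_next : Int) :
    find_next_header_y_between header_boxes y_start y_next
      = find_next_header_y_between_alt header_boxes y_start y_next := by
  unfold find_next_header_y_between find_next_header_y_between_alt
  set p : Int → Bool := fun y => decide (y_start < y ∧ y < y_next) with hp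
  set ys : List Int := header_boxes.map pvKey with hys
  set s : List Int := PySem.List.sorted ys (fun y => y) false with hsdef
  -- A's foldl builds exactly the filtered-mapped candidate list
  have hc : header_boxes.foldl (fun acc hb =>
      if y_start < pvKey hb ∧ pvKey hb < y_next then acc ++ [pvKey hb] else acc) []
      = ys.filter p := by
    have h1 := PySem.List.foldl_append_if (l := header_boxes)
      (p := fun hb => p (pvKey hb)) (f := pvKey) (acc := ([] : List Int))
    have h2 : ys.filter p = (header_boxes.filter (fun hb => p (pvKey hb))).map pvKey := by
      simp only [hys, List.filter_map]
      rfl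
    rw [h2]
    simpa [hp, decide_eq_true_eq] using h1
  rw [hc]
  by_cases hnil : ys.filter p = []
  · -- no candidate: find? over the sorted list is none too
    rw [hnil]
    symm
    refine List.find?_eq_none.mpr ?_
    intro y hy
    have hyys : y ∈ ys := (PySem.List.mem_sorted _ _ _ _).mp hy
    intro hpy
    exact (List.filter_eq_nil_iff.mp hnil) y hyys hpy
  · rw [if_neg hnil]
    -- A's value: the min of the candidates
    obtain ⟨a, hamin⟩ : ∃ a, PySem.List.min? (ys.filter p) (fun x => x) = some a := by
      cases hmo : PySem.List.min? (ys.filter p) (fun x => x) with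
      | none => exact absurd ((PySem.List.min?_eq_none_iff _ _).mp hmo) hnil
      | some a => exact ⟨a, rfl⟩
    have hamem : a ∈ ys.filter p := PySem.List.min?_mem hamin
    have hisin : ∀ y ∈ ys.filter p, a ≤ y := by
      intro y hy
      exact PySem.List.min?_isMin hamin y hy
    rw [hamin]
    symm
    refine pv_find?_sorted p s ?_ a ?_ ?_ ?_
    · simpa using PySem.List.sorted_pairwise (xs := ys) (key := fun y => y)
    · exact (PySem.List.mem_sorted _ _ _ _).mpr (List.mem_of_mem_filter hamem)
    · exact List.of_mem_filter hamem
    · intro y hy hpy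
      exact hisin y (List.mem_filter.mpr ⟨(PySem.List.mem_sorted _ _ _ _).mp hy, hpy⟩)

-- ===== VERDICT =====
theorem find_next_header_y_between_spec : Claim_equal_find_next_header_y_between := by
  intro header_boxes y_start y_next _ _
  unfold Spec_find_next_header_y_between
  exact pv_main header_boxes y_start y_next
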